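-- pv_equiv track=rewrite | github.com/mungaihosea/python-matrices | solution.py | FirstInSecondRec
-- ===== SOURCE A (Python) =====
-- def FirstInSecondRec(A, b):
--     if len(A) > 0: #repeat until the list is empty
--         if not b.__contains__(A[0]): #check the first row
--             return False
--         else:
--             A.remove(A[0]) #remove the checked row and
--             return FirstInSecondRec(A, b)   # recursion till False or True is returned
--     else:
--         return True
-- ===== SOURCE B (Python) =====
-- def FirstInSecondRec(A, b):
--     # Return-value equivalent: True iff every element of A is contained in b.
--     # Note: unlike A, this does NOT drain the list A in place.
--     return all(x in b for x in A)
-- ===== Notes on version B (the rewrite author's own statement) =====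
-- stated objective: idiomatic
-- what changed: Replaces the tail recursion that pops A[0] and recurses with a single all() membership comprehension; equivalence is about the return value only (A drains the list A in place, B does not mutate it).
import Mathlib
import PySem

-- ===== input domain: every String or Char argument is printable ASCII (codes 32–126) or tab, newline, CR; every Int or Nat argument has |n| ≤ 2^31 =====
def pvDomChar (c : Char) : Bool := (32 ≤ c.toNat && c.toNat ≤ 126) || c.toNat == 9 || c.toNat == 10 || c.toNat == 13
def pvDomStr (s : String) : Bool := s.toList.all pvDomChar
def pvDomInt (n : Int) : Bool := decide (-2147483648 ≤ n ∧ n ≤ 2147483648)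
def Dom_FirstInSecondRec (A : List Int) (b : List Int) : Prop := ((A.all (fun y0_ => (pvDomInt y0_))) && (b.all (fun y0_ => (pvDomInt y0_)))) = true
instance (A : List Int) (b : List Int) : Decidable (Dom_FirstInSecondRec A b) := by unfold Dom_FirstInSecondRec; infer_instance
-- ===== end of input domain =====

-- B replaces A's pop-and-recurse with an idiomatic all()-membership check; equivalent in RETURN VALUE only (Python A drains its argument A in place, B does not mutate it).
-- ===== PORT A =====
-- Transliteration of A: recursion; `A.remove(A[0])` removes the first occurrence of
-- A[0], i.e. element 0 itself (PySem.List.remove?_cons_self), leaving the tail.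
def FirstInSecondRec (A : List Int) (b : List Int) : Bool :=
  match A with
  | [] => true                              -- else: return True
  | x :: rest =>                            -- len(A) > 0
    if !(b.contains x) then false           -- if not b.__contains__(A[0]): return False
    else FirstInSecondRec rest b            -- A.remove(A[0]); return FirstInSecondRec(A, b)

-- ===== PORT B =====
-- B: all(x in b for x in A); return value only — B does not mutate A, Python A drains it.
def FirstInSecondRec_alt (A : List Int) (b : List Int) : Bool :=
  A.all (fun x => b.contains x)

-- ===== PRECONDITION & SPEC =====
def Spec_FirstInSecondRec (A : List Int) (b : List Int) (out : Bool) : Prop := out = FirstInSecondRec_alt A b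
instance (A : List Int) (b : List Int) (out : Bool) : Decidable (Spec_FirstInSecondRec A b out) := by unfold Spec_FirstInSecondRec; infer_instance

-- ===== CLAIM (what is proved, stated in full; the proofs are below) =====
def Claim_equal_FirstInSecondRec : Prop := ∀ (A : List Int) (b : List Int), Dom_FirstInSecondRec A b → Spec_FirstInSecondRec A b (FirstInSecondRec A b)

-- ===== LEMMAS AND PROOFS =====

-- ===== VERDICT (by name: the statement is the Claim_ definition above) =====
theorem FirstInSecondRec_spec : Claim_equal_FirstInSecondRec := by
  intro A b hd
  clear hd
  unfold Spec_FirstInSecondRec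
  induction A with
  | nil => simp [FirstInSecondRec, FirstInSecondRec_alt]
  | cons x rest ih =>
    simp only [FirstInSecondRec, FirstInSecondRec_alt, List.all_cons] at *
    by_cases h : b.contains x <;> simp [ih]
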